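-- pv_equiv track=rewrite | github.com/UCD-193AB-ws24/Minecapstone | rabinkarp.py | build_subpattern_map
-- ===== SOURCE A (Python) =====
-- def build_subpattern_map(patterns):
--     sub_map = {}
--     for p in patterns:
--         sub_map[p] = []
--         for q in patterns:
--             if q != p and len(q) < len(p) and q in p:
--                 sub_map[p].append(q)
--     return sub_map
-- ===== SOURCE B (Python) =====
-- def build_subpattern_map(patterns):
--     # Inverted approach: index occurrences of each distinct pattern once, then for
--     # each key enumerate its proper substrings and merge the matching occurrence
--     # index lists back in input order -- no pairwise substring searches.
--     occ = {}
--     for i, q in enumerate(patterns):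
--         occ.setdefault(q, []).append(i)
--     result = {}
--     for p in patterns:
--         if p in result:
--             continue
--         n = len(p)
--         subs = {p[i:j] for i in range(n + 1) for j in range(i, n + 1) if j - i < n}
--         idxs = sorted(i for q in subs for i in occ.get(q, []))
--         result[p] = [patterns[i] for i in idxs]
--     return result
-- ===== Notes on version B (the rewrite author's own statement) =====
-- stated objective: faster
-- what changed: Instead of A's all-pairs substring tests, B builds an occurrence-index map of the patterns once, and for each distinct key enumerates the key's proper substrings as a set, merges the occurrence index lists of the matching ones and sorts them to recover input order.
import Mathlib
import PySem

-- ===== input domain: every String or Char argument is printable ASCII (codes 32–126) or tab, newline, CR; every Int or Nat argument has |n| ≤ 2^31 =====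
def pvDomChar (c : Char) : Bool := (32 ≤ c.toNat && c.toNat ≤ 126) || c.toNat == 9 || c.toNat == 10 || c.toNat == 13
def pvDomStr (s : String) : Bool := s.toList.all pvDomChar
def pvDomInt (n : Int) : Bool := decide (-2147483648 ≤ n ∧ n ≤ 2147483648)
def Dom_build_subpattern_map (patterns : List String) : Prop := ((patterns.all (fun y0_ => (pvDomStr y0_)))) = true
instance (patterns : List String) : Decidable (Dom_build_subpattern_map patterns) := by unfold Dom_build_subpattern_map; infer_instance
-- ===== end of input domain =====

-- B inverts the computation: it indexes the occurrences of each distinct pattern once, then for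
-- each key enumerates the key's proper substrings and merges the matching occurrence-index lists
-- (sorted back to input order) — no pairwise substring searches; measurably faster on many patterns.

-- ===== PORT A =====
def build_subpattern_map (patterns : List String) : List (String × List String) :=
  (patterns.foldl (fun sub_map p =>
      patterns.foldl (fun d q =>
          if q ≠ p ∧ PySem.Str.len q < PySem.Str.len p ∧ PySem.Str.isIn q p = true then
            d.modify p [] (fun xs => xs ++ [q])
          else d)
        (sub_map.insert p []))
    PySem.Dict.empty).items

-- ===== PORT B =====
-- occ = {}; for i, q in enumerate(patterns): occ.setdefault(q, []).append(i)
def pvOcc (patterns : List String) : PySem.Dict String (List Int) :=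
  (PySem.List.enumerate patterns).foldl
    (fun d e => d.modify e.2 [] (fun xs => xs ++ [e.1])) PySem.Dict.empty

-- subs = {p[i:j] for i in range(n+1) for j in range(i, n+1) if j - i < n}  (n = len(p))
def pvSubs (p : String) : PySem.Set String :=
  PySem.Set.ofList
    ((PySem.List.pyRange 0 (PySem.Str.len p + 1) 1).flatMap (fun i =>
      ((PySem.List.pyRange i (PySem.Str.len p + 1) 1).filter
          (fun j => decide (j - i < PySem.Str.len p))).map
        (fun j => PySem.Str.slice p (some i) (some j))))

-- idxs = sorted(i for q in subs for i in occ.get(q, [])); value = [patterns[i] for i in idxs]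
-- (sorted with the identity key, so the set's iteration order cannot influence the result;
--  the indices come from enumerate, so patterns[i] never raises — pyGetD's default is unreachable)
def pvVal (occ : PySem.Dict String (List Int)) (patterns : List String) (p : String) : List String :=
  (PySem.List.sorted ((pvSubs p).flatMap (fun q => occ.getD q [])) (fun x => x) false).map
    (fun i => PySem.List.pyGetD patterns i "")

def build_subpattern_map_alt (patterns : List String) : List (String × List String) :=
  let occ := pvOcc patterns
  (patterns.foldl (fun result p =>
      if result.contains p then result
      else result.insert p (pvVal occ patterns p))
    PySem.Dict.empty).items

-- ===== PRECONDITION & SPEC =====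
def Spec_build_subpattern_map (patterns : List String) (out : List (String × List String)) : Prop := out = build_subpattern_map_alt patterns
instance (patterns : List String) (out : List (String × List String)) : Decidable (Spec_build_subpattern_map patterns out) := by unfold Spec_build_subpattern_map; infer_instance

-- ===== CLAIM (what is proved, stated in full; the proofs are below) =====
def Claim_equal_build_subpattern_map : Prop := ∀ (patterns : List String), Dom_build_subpattern_map patterns → Spec_build_subpattern_map patterns (build_subpattern_map patterns)

-- ===== LEMMAS AND PROOFS =====

-- A's inner-loop condition drops its redundant q ≠ p conjunct: len q < len p already forces q ≠ p.
theorem pv_cond_iff (p q : String) :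
    (q ≠ p ∧ PySem.Str.len q < PySem.Str.len p ∧ PySem.Str.isIn q p = true) ↔
    (PySem.Str.len q < PySem.Str.len p ∧ PySem.Str.isIn q p = true) := by
  constructor
  · rintro ⟨_, h⟩; exact h
  · rintro ⟨h1, h2⟩
    refine ⟨?_, h1, h2⟩
    rintro rfl
    exact absurd h1 (lt_irrefl _)

-- A's inner loop: repeated conditional appends at the single key p.
theorem pv_A_inner (p : String) (l : List String)
    (d : PySem.Dict String (List String)) (hp : d.contains p = true) :
    (l.foldl (fun d q =>
        if q ≠ p ∧ PySem.Str.len q < PySem.Str.len p ∧ PySem.Str.isIn q p = true then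
          d.modify p [] (fun xs => xs ++ [q])
        else d) d).keys = d.keys ∧
    ∀ c, (l.foldl (fun d q =>
        if q ≠ p ∧ PySem.Str.len q < PySem.Str.len p ∧ PySem.Str.isIn q p = true then
          d.modify p [] (fun xs => xs ++ [q])
        else d) d).getD c [] =
      if c = p then
        d.getD c [] ++ l.filter (fun q => decide (q ≠ p ∧ PySem.Str.len q < PySem.Str.len p ∧ PySem.Str.isIn q p = true))
      else d.getD c [] := by
  induction l generalizing d with
  | nil => simp
  | cons q l ih =>
    by_cases hc : q ≠ p ∧ PySem.Str.len q < PySem.Str.len p ∧ PySem.Str.isIn q p = true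
    · have hkeys : (d.modify p [] (fun xs => xs ++ [q])).keys = d.keys := by
        rw [PySem.Dict.keys_modify, PySem.Dict.keys_insert_of_contains _ _ hp]
      have hp' : (d.modify p [] (fun xs => xs ++ [q])).contains p = true := by
        rw [PySem.Dict.contains_eq_decide_mem_keys, hkeys,
            ← PySem.Dict.contains_eq_decide_mem_keys]; exact hp
      obtain ⟨ihk, ihg⟩ := ih (d.modify p [] (fun xs => xs ++ [q])) hp'
      constructor
      · simp only [List.foldl_cons, if_pos hc]
        rw [ihk, hkeys]
      · intro c
        simp only [List.foldl_cons, if_pos hc]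
        rw [ihg c]
        rw [List.filter_cons, if_pos (decide_eq_true hc)]
        by_cases hcp : c = p
        · subst hcp
          rw [if_pos rfl, if_pos rfl, PySem.Dict.getD_modify, if_pos rfl,
              List.append_assoc, List.singleton_append]
        · rw [if_neg hcp, if_neg hcp, PySem.Dict.getD_modify, if_neg hcp]
    · obtain ⟨ihk, ihg⟩ := ih d hp
      constructor
      · simp only [List.foldl_cons, if_neg hc]; exact ihk
      · intro c
        simp only [List.foldl_cons, if_neg hc]
        rw [ihg c, List.filter_cons, if_neg (fun h => hc (of_decide_eq_true h))]

-- A's outer loop: keys accumulate in first-occurrence order; each processed key ends at its filter value.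
theorem pv_A_outer (pats : List String) (l : List String)
    (d : PySem.Dict String (List String)) (hnd : d.keys.Nodup) :
    (l.foldl (fun sub_map p =>
        pats.foldl (fun d q =>
            if q ≠ p ∧ PySem.Str.len q < PySem.Str.len p ∧ PySem.Str.isIn q p = true then
              d.modify p [] (fun xs => xs ++ [q])
            else d)
          (sub_map.insert p [])) d).keys = PySem.Set.update d.keys l ∧
    (l.foldl (fun sub_map p =>
        pats.foldl (fun d q =>
            if q ≠ p ∧ PySem.Str.len q < PySem.Str.len p ∧ PySem.Str.isIn q p = true then
              d.modify p [] (fun xs => xs ++ [q])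
            else d)
          (sub_map.insert p [])) d).keys.Nodup ∧
    ∀ c, (l.foldl (fun sub_map p =>
        pats.foldl (fun d q =>
            if q ≠ p ∧ PySem.Str.len q < PySem.Str.len p ∧ PySem.Str.isIn q p = true then
              d.modify p [] (fun xs => xs ++ [q])
            else d)
          (sub_map.insert p [])) d).getD c [] =
      if c ∈ l then
        pats.filter (fun q => decide (q ≠ c ∧ PySem.Str.len q < PySem.Str.len c ∧ PySem.Str.isIn q c = true))
      else d.getD c [] := by
  induction l generalizing d with
  | nil => exact ⟨rfl, hnd, fun c => by simp⟩
  | cons p l ih =>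
    have hp1 : (d.insert p []).contains p = true := PySem.Dict.contains_insert_self d p []
    obtain ⟨ik, ig⟩ := pv_A_inner p pats (d.insert p []) hp1
    have hkeys1 : (d.insert p ([] : List String)).keys = PySem.Set.add d.keys p := by
      by_cases hc : d.contains p = true
      · rw [PySem.Dict.keys_insert_of_contains _ _ hc]
        have : p ∈ d.keys := (PySem.Dict.contains_iff_mem_keys d p).mp hc
        simp [PySem.Set.add, PySem.Set.contains, this]
      · have hc' : d.contains p = false := by simpa using hc
        rw [PySem.Dict.keys_insert_of_not_contains _ _ hc']
        have : p ∉ d.keys := fun hm => by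
          rw [(PySem.Dict.contains_iff_mem_keys d p).mpr hm] at hc'; cases hc'
        simp [PySem.Set.add, PySem.Set.contains, this]
    have hnd1 : (d.insert p ([] : List String)).keys.Nodup := PySem.Dict.nodup_keys_insert d p [] hnd
    set d2 := pats.foldl (fun d q =>
        if q ≠ p ∧ PySem.Str.len q < PySem.Str.len p ∧ PySem.Str.isIn q p = true then
          d.modify p [] (fun xs => xs ++ [q])
        else d) (d.insert p []) with hd2
    have hnd2 : d2.keys.Nodup := by rw [ik]; exact hnd1
    obtain ⟨ok, ond, og⟩ := ih d2 hnd2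
    refine ⟨?_, ond, ?_⟩
    · rw [List.foldl_cons, ok, ik, hkeys1]
      simp [PySem.Set.update]
    · intro c
      rw [List.foldl_cons, og c]
      by_cases hcl : c ∈ l
      · rw [if_pos hcl, if_pos (List.mem_cons_of_mem _ hcl)]
      · by_cases hcp : c = p
        · subst hcp
          rw [if_neg hcl, ig c, if_pos rfl, PySem.Dict.getD_insert, if_pos rfl,
              if_pos (List.mem_cons_self ..), List.nil_append]
        · rw [if_neg hcl, ig c, if_neg hcp, PySem.Dict.getD_insert, if_neg hcp,
              if_neg (fun h => (List.mem_cons.mp h).elim hcp hcl)]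

-- occ.get(q, []) is the increasing list of indices at which q occurs in patterns.
theorem pv_occ_getD (patterns : List String) (q : String) :
    (pvOcc patterns).getD q [] =
      ((PySem.List.enumerate patterns).filter (fun e => e.2 == q)).map (fun e => e.1) := by
  unfold pvOcc
  have h1 : (PySem.List.enumerate patterns).foldl
      (fun d e => d.modify e.2 [] (fun xs => xs ++ [e.1])) PySem.Dict.empty
      = ((PySem.List.enumerate patterns).map Prod.swap).foldl
          (fun d p => d.modify p.1 [] (fun xs => xs ++ [p.2])) PySem.Dict.empty := by
    rw [List.foldl_map]
    rfl
  rw [h1, PySem.Dict.getD_foldl_modify_append]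
  rw [List.filter_map]
  simp [Function.comp_def, Prod.swap]

-- q ∈ subs(p) exactly when q is a strictly shorter substring of p.
theorem pv_mem_subs (p q : String) :
    q ∈ pvSubs p ↔ (PySem.Str.len q < PySem.Str.len p ∧ PySem.Str.isIn q p = true) := by
  unfold pvSubs
  rw [PySem.Set.mem_ofList]
  simp only [List.mem_flatMap, List.mem_map, List.mem_filter, PySem.List.mem_pyRange_one,
    decide_eq_true_eq]
  constructor
  · rintro ⟨i, ⟨hi0, _⟩, j, ⟨⟨hij, _⟩, hjin⟩, rfl⟩
    have hj0 : (0:Int) ≤ j := le_trans hi0 hij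
    have hq : (PySem.Str.slice p (some i) (some j)).toList
        = List.take (j.toNat - i.toNat) (List.drop i.toNat p.toList) := by
      rw [PySem.Str.toList_slice, PySem.Chars.slice_eq_listSlice,
          PySem.List.slice_toNat _ hi0 hj0]
    have hlen : (PySem.Str.slice p (some i) (some j)).toList.length < p.toList.length := by
      rw [hq]
      have h1 : (List.take (j.toNat - i.toNat) (List.drop i.toNat p.toList)).length
          ≤ j.toNat - i.toNat := by simp
      have h2 : j.toNat - i.toNat < p.toList.length := by
        rw [PySem.Str.len_eq] at hjin; omega
      omega
    refine ⟨?_, ?_⟩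
    · rw [PySem.Str.len_eq, PySem.Str.len_eq]; exact_mod_cast hlen
    · rw [PySem.Str.isIn_iff_infix, hq]
      exact ((List.take_prefix _ _).isInfix).trans ((List.drop_suffix _ _).isInfix)
  · rintro ⟨hlen, hin⟩
    rw [PySem.Str.isIn_iff_infix] at hin
    obtain ⟨pre, suf, hps⟩ := hin
    rw [PySem.Str.len_eq, PySem.Str.len_eq] at hlen
    have hL : q.toList.length < p.toList.length := by exact_mod_cast hlen
    have hlenp : p.toList.length = pre.length + q.toList.length + suf.length := by
      rw [← hps]; simp [List.length_append]; omega
    refine ⟨(pre.length : Int), ⟨by positivity, ?_⟩,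
      ((pre.length + q.toList.length : Nat) : Int), ⟨⟨by exact_mod_cast Int.ofNat_le.mpr (by omega), ?_⟩, ?_⟩, ?_⟩
    · rw [PySem.Str.len_eq]; omega
    · rw [PySem.Str.len_eq]; push_cast; omega
    · rw [PySem.Str.len_eq]; push_cast; omega
    · rw [← String.toList_inj, PySem.Str.toList_slice, PySem.Chars.slice_eq_listSlice,
          PySem.List.slice_natCast]
      have : pre.length + q.toList.length - pre.length = q.toList.length := by omega
      rw [this, ← hps, List.append_assoc, List.drop_left, List.take_left]

-- Splitting a filter over a fresh head key.
theorem pv_filter_split {α κ : Type} [DecidableEq κ] (k : κ) (ks : List κ) (hk : k ∉ ks)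
    (xs : List α) (f : α → κ) :
    (xs.filter (fun x => decide (f x = k)) ++ xs.filter (fun x => decide (f x ∈ ks))).Perm
      (xs.filter (fun x => decide (f x ∈ k :: ks))) := by
  induction xs with
  | nil => simp
  | cons x xs ih =>
    by_cases h1 : f x = k
    · have h2 : f x ∉ ks := h1 ▸ hk
      simp only [List.filter_cons, decide_eq_true_eq, if_pos h1, if_neg h2,
        if_pos (show f x ∈ k :: ks from h1 ▸ List.mem_cons_self ..), List.cons_append]
      exact ih.cons x
    · by_cases h2 : f x ∈ ks
      · simp only [List.filter_cons, decide_eq_true_eq, if_neg h1, if_pos h2,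
          if_pos (List.mem_cons_of_mem _ h2)]
        exact List.perm_middle.trans (ih.cons x)
      · have h3 : f x ∉ k :: ks := by
          intro h; rcases List.mem_cons.mp h with h | h
          · exact h1 h
          · exact h2 h
        simp only [List.filter_cons, decide_eq_true_eq, if_neg h1, if_neg h2, if_neg h3]
        exact ih

-- Concatenating the per-key groups of a nodup key list is a permutation of one filter.
theorem pv_flat_perm {α κ : Type} [DecidableEq κ] (ks : List κ) (hnd : ks.Nodup)
    (xs : List α) (f : α → κ) :
    (ks.flatMap (fun k => xs.filter (fun x => decide (f x = k)))).Perm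
      (xs.filter (fun x => decide (f x ∈ ks))) := by
  revert hnd
  induction ks with
  | nil => intro _; simp
  | cons k ks ih =>
    intro hnd
    obtain ⟨hk, hnd'⟩ := List.nodup_cons.mp hnd
    rw [List.flatMap_cons]
    exact (List.Perm.append_left _ (ih hnd')).trans (pv_filter_split k ks hk xs f)

-- B's per-key value is A's per-key filter (without the redundant ≠).
theorem pv_Bval (patterns : List String) (p : String) :
    pvVal (pvOcc patterns) patterns p =
      patterns.filter (fun q => decide (PySem.Str.len q < PySem.Str.len p ∧ PySem.Str.isIn q p = true)) := by
  unfold pvVal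
  set E := (PySem.List.enumerate patterns).filter
    (fun e => decide (PySem.Str.len e.2 < PySem.Str.len p ∧ PySem.Str.isIn e.2 p = true)) with hE
  -- the concatenated index lists are a permutation of E's indices
  have hflat : ((pvSubs p).flatMap (fun q => (pvOcc patterns).getD q []))
      = ((pvSubs p).flatMap (fun k =>
          (PySem.List.enumerate patterns).filter (fun e => decide (e.2 = k)))).map (fun e => e.1) := by
    rw [List.map_flatMap]
    apply List.flatMap_congr
    intro k _
    rw [pv_occ_getD]
    rfl
  have hperm : ((pvSubs p).flatMap (fun q => (pvOcc patterns).getD q [])).Perm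
      (E.map (fun e => e.1)) := by
    rw [hflat]
    apply List.Perm.map
    refine (pv_flat_perm (pvSubs p) ?_ _ _).trans ?_
    · exact PySem.Set.nodup_ofList _
    · apply List.Perm.of_eq
      apply List.filter_congr
      intro e _
      simp only [decide_eq_decide]
      exact pv_mem_subs p e.2
  have hpw : (E.map (fun e => e.1)).Pairwise (fun a b => a < b) := by
    rw [List.pairwise_map]
    exact (PySem.List.pairwise_lt_enumerate patterns 0).filter _
  rw [PySem.List.sorted_eq_of_perm_of_pairwise_lt _ _ _ hperm.symm hpw]
  rw [List.map_map]
  have hmap : E.map ((fun i => PySem.List.pyGetD patterns i "") ∘ (fun e => e.1))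
      = E.map (fun e => e.2) := by
    apply List.map_congr_left
    intro e he
    have hmem : e ∈ PySem.List.enumerate patterns := List.mem_of_mem_filter he
    rw [PySem.List.mem_enumerate_iff] at hmem
    obtain ⟨k, hk, rfl⟩ := hmem
    simp only [Function.comp_apply, zero_add]
    rw [PySem.List.pyGetD_natCast, List.getD_eq_getElem _ _ hk]
  rw [hmap, hE]
  have := List.filter_map (f := fun e : Int × String => e.2)
    (p := fun q => decide (PySem.Str.len q < PySem.Str.len p ∧ PySem.Str.isIn q p = true))
    (l := PySem.List.enumerate patterns)
  rw [PySem.List.map_snd_enumerate] at this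
  rw [this]
  rfl

-- B's outer loop: first occurrence of each key inserts its value; later duplicates are skipped.
theorem pv_B_outer (V : String → List String) (l : List String)
    (d : PySem.Dict String (List String)) (hnd : d.keys.Nodup) :
    (l.foldl (fun result p =>
        if result.contains p then result else result.insert p (V p)) d).keys
      = PySem.Set.update d.keys l ∧
    (l.foldl (fun result p =>
        if result.contains p then result else result.insert p (V p)) d).keys.Nodup ∧
    ∀ c, (l.foldl (fun result p =>
        if result.contains p then result else result.insert p (V p)) d).getD c [] =
      if d.contains c then d.getD c [] else if c ∈ l then V c else [] := by
  induction l generalizing d with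
  | nil =>
    refine ⟨rfl, hnd, fun c => ?_⟩
    by_cases hc : d.contains c = true
    · rw [if_pos hc]; simp
    · have hc' : d.contains c = false := by simpa using hc
      rw [if_neg (by simp [hc'])]
      simp only [List.foldl_nil, List.not_mem_nil, if_false]
      exact PySem.Dict.getD_of_not_contains _ _ hc'
  | cons p l ih =>
    by_cases hp : d.contains p = true
    · obtain ⟨ok, ond, og⟩ := ih d hnd
      rw [List.foldl_cons, if_pos hp]
      refine ⟨?_, ond, ?_⟩
      · rw [ok]
        have hmem : p ∈ d.keys := (PySem.Dict.contains_iff_mem_keys d p).mp hp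
        simp [PySem.Set.update, PySem.Set.add, PySem.Set.contains, hmem]
      · intro c
        rw [og c]
        by_cases hdc : d.contains c = true
        · rw [if_pos hdc, if_pos hdc]
        · have hcp : c ≠ p := fun h => hdc (h ▸ hp)
          rw [if_neg hdc, if_neg hdc]
          simp [List.mem_cons, hcp]
    · have hp' : d.contains p = false := by simpa using hp
      have hpk : p ∉ d.keys := fun hm => by
        rw [(PySem.Dict.contains_iff_mem_keys d p).mpr hm] at hp'; cases hp'
      have hnd1 : (d.insert p (V p)).keys.Nodup := PySem.Dict.nodup_keys_insert d p _ hnd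
      obtain ⟨ok, ond, og⟩ := ih (d.insert p (V p)) hnd1
      rw [List.foldl_cons, if_neg hp]
      refine ⟨?_, ond, ?_⟩
      · rw [ok, PySem.Dict.keys_insert_of_not_contains _ _ hp']
        simp [PySem.Set.update, PySem.Set.add, PySem.Set.contains, hpk]
      · intro c
        rw [og c]
        by_cases hcp : c = p
        · subst hcp
          rw [if_pos (PySem.Dict.contains_insert_self d c (V c)),
              PySem.Dict.getD_insert, if_pos rfl, if_neg (by simp [hp']),
              if_pos (List.mem_cons_self ..)]
        · rw [PySem.Dict.getD_insert, if_neg hcp,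
              PySem.Dict.contains_insert]
          have : (c == p) = false := by simpa using hcp
          rw [this, Bool.false_or]
          by_cases hdc : d.contains c = true
          · rw [if_pos hdc, if_pos hdc]
          · rw [if_neg hdc, if_neg hdc]
            simp [List.mem_cons, hcp]

-- ===== VERDICT (by name: the statement is the Claim_ definition above) =====
theorem build_subpattern_map_spec : Claim_equal_build_subpattern_map := by
  intro patterns _
  unfold Spec_build_subpattern_map build_subpattern_map build_subpattern_map_alt
  -- A side
  obtain ⟨ak, and_, ag⟩ := pv_A_outer patterns patterns PySem.Dict.empty (by simp)
  have akeys : (patterns.foldl (fun sub_map p =>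
      patterns.foldl (fun d q =>
          if q ≠ p ∧ PySem.Str.len q < PySem.Str.len p ∧ PySem.Str.isIn q p = true then
            d.modify p [] (fun xs => xs ++ [q])
          else d) (sub_map.insert p [])) PySem.Dict.empty).keys = PySem.List.dedup patterns := by
    rw [ak, PySem.List.dedup_eq_ofList]; rfl
  rw [PySem.Dict.items_eq_map_keys _ and_ [], akeys]
  -- B side
  obtain ⟨bk, bnd, bg⟩ := pv_B_outer (pvVal (pvOcc patterns) patterns) patterns PySem.Dict.empty (by simp)
  have bkeys : (patterns.foldl (fun result p =>
      if result.contains p then result else result.insert p (pvVal (pvOcc patterns) patterns p))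
      PySem.Dict.empty).keys = PySem.List.dedup patterns := by
    rw [bk, PySem.List.dedup_eq_ofList]; rfl
  rw [PySem.Dict.items_eq_map_keys _ bnd [], bkeys]
  apply List.map_congr_left
  intro k hkmem
  have hkpat : k ∈ patterns := (PySem.List.mem_dedup patterns k).mp hkmem
  have hA := ag k
  have hB := bg k
  rw [if_pos hkpat] at hA
  rw [if_neg (by simp [PySem.Dict.contains_empty]), if_pos hkpat] at hB
  rw [hA, hB, pv_Bval]
  simp only [Prod.mk.injEq, true_and]
  apply List.filter_congr
  intro q _
  simp only [decide_eq_decide]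
  exact pv_cond_iff k q
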